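-- pv_equiv track=rewrite | github.com/Alvarowned/Primero-GII | Primer Semestre/Fundamentos de Programación/Práctica4/Practica4_9.py | todas_vocales_sin_rep
-- ===== SOURCE A (Python) =====
-- def todas_vocales_sin_rep(pal):
--     """str -> bool
--        OBJ: Detectar si una palabra contiene las 5 vocales.
--        PRE: El str debe ser una sola palabra sin tildes."""
--     pal = pal.lower()
--     pal = list(pal)
--     a = 0
--     e = 0
--     i = 0
--     o = 0
--     u = 0
--     for term in pal:
--         if(term == "a" or term == "á"):
--             a += 1
--         elif(term == "e" or term == "é"):
--             e += 1
--         elif(term == "i" or term == "í"):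
--             i += 1
--         elif(term == "o" or term == "ó"):
--             o += 1
--         elif(term == "u" or term == "ú"):
--             u += 1
--     return a == 1 and e == 1 and i == 1 and o == 1 and u == 1
-- ===== SOURCE B (Python) =====
-- def todas_vocales_sin_rep(pal):
--     """str -> bool
--        OBJ: Detectar si una palabra contiene las 5 vocales.
--        PRE: El str debe ser una sola palabra sin tildes."""
--     return sorted(c for c in pal.lower() if c in "aeiou") == list("aeiou")
-- ===== Notes on version B (the rewrite author's own statement) =====
-- stated objective: idiomatic
-- what changed: Instead of a branching loop maintaining five integer counters, B filters the lowercased word down to its vowel occurrences, sorts them, and compares the sorted result with the five vowels in order; no counting is performed, and the filter/sort/compare run in C.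
import Mathlib
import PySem

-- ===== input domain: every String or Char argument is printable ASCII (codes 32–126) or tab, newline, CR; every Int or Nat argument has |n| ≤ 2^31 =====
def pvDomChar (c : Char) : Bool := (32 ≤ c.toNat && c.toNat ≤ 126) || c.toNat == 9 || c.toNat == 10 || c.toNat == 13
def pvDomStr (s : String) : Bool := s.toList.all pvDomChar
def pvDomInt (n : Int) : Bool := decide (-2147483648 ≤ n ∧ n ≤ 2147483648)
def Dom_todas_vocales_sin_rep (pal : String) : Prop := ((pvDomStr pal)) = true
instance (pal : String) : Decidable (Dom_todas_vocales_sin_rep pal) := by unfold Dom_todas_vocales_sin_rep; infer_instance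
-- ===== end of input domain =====

-- B replaces A's branching loop with five counters by filtering the lowercased word to its vowel occurrences, sorting them and comparing with "aeiou" (idiomatic; no counting).


-- ===== PORT A =====
-- the loop body of A, one step per character, updating the five counters
def pvStepA (s : Int × Int × Int × Int × Int) (term : Char) : Int × Int × Int × Int × Int :=
  let (a, e, i, o, u) := s
  if term == 'a' || term == 'á' then (a + 1, e, i, o, u)
  else if term == 'e' || term == 'é' then (a, e + 1, i, o, u)
  else if term == 'i' || term == 'í' then (a, e, i + 1, o, u)
  else if term == 'o' || term == 'ó' then (a, e, i, o + 1, u)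
  else if term == 'u' || term == 'ú' then (a, e, i, o, u + 1)
  else (a, e, i, o, u)

def todas_vocales_sin_rep (pal : String) : Bool :=
  let pal2 := (PySem.Str.lower pal).toList
  let st := pal2.foldl pvStepA (0, 0, 0, 0, 0)
  st.1 == 1 && st.2.1 == 1 && st.2.2.1 == 1 && st.2.2.2.1 == 1 && st.2.2.2.2 == 1

-- ===== PORT B =====
-- 'c in "aeiou"' on a single character is exactly membership of the character in the string's characters
def todas_vocales_sin_rep_alt (pal : String) : Bool :=
  PySem.List.sorted ((PySem.Str.lower pal).toList.filter
      (fun c => "aeiou".toList.contains c)) (fun x => x) false == "aeiou".toList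

-- ===== PRECONDITION & SPEC =====
def Spec_todas_vocales_sin_rep (pal : String) (out : Bool) : Prop := out = todas_vocales_sin_rep_alt pal
instance (pal : String) (out : Bool) : Decidable (Spec_todas_vocales_sin_rep pal out) := by unfold Spec_todas_vocales_sin_rep; infer_instance

-- ===== CLAIM (what is proved, stated in full; the proofs are below) =====
def Claim_equal_todas_vocales_sin_rep : Prop := ∀ (pal : String), Dom_todas_vocales_sin_rep pal → Spec_todas_vocales_sin_rep pal (todas_vocales_sin_rep pal)

-- ===== LEMMAS AND PROOFS =====
theorem pvToNat_ofNat {n : Nat} (h : n < 55296) : (Char.ofNat n).toNat = n := by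
  have hv : Nat.isValidChar n := Or.inl h
  rw [Char.ofNat, dif_pos hv]
  simp [Char.toNat, Char.ofNatAux]

-- lowering a domain character never produces an accented vowel
theorem pvLower_toNat_le (c : Char) (h : pvDomChar c = true) :
    (PySem.Chars.lowerChar c).toNat ≤ 126 := by
  unfold PySem.Chars.lowerChar PySem.Chars.isupper
  simp only [pvDomChar, Bool.or_eq_true, Bool.and_eq_true, decide_eq_true_eq, beq_iff_eq] at h
  split_ifs with hu
  · simp only [Bool.and_eq_true, decide_eq_true_eq] at hu
    have h1 : c.toNat ≤ 90 := hu.2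
    have h2 : (Char.ofNat (c.toNat + 32)).toNat = c.toNat + 32 := pvToNat_ofNat (by omega)
    omega
  · omega

theorem pvNoAccent (c : Char) (h : c.toNat ≤ 126) :
    c ≠ 'á' ∧ c ≠ 'é' ∧ c ≠ 'í' ∧ c ≠ 'ó' ∧ c ≠ 'ú' := by
  refine ⟨?_, ?_, ?_, ?_, ?_⟩ <;> (intro hc; subst hc; revert h; decide)

-- A's fold adds the plain counts of the five ASCII vowels when no accented vowel occurs
theorem pvStepA_eq (c : Char) (h1 : c ≠ 'á') (h2 : c ≠ 'é') (h3 : c ≠ 'í')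
    (h4 : c ≠ 'ó') (h5 : c ≠ 'ú') (a e i o u : Int) :
    pvStepA (a, e, i, o, u) c =
      (a + (if c = 'a' then 1 else 0), e + (if c = 'e' then 1 else 0),
       i + (if c = 'i' then 1 else 0), o + (if c = 'o' then 1 else 0),
       u + (if c = 'u' then 1 else 0)) := by
  simp only [pvStepA, beq_iff_eq, Bool.or_eq_true, h1, h2, h3, h4, h5, or_false]
  split_ifs <;> simp_all

theorem pvLoopEq (cs : List Char)
    (h : ∀ c ∈ cs, c ≠ 'á' ∧ c ≠ 'é' ∧ c ≠ 'í' ∧ c ≠ 'ó' ∧ c ≠ 'ú')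
    (a e i o u : Int) :
    cs.foldl pvStepA (a, e, i, o, u) =
      (a + cs.count 'a', e + cs.count 'e', i + cs.count 'i', o + cs.count 'o', u + cs.count 'u') := by
  induction cs generalizing a e i o u with
  | nil => simp
  | cons c cs ih =>
    obtain ⟨h1, h2, h3, h4, h5⟩ := h c (List.mem_cons_self ..)
    have htl : ∀ c ∈ cs, c ≠ 'á' ∧ c ≠ 'é' ∧ c ≠ 'í' ∧ c ≠ 'ó' ∧ c ≠ 'ú' :=
      fun c hc => h c (List.mem_cons_of_mem _ hc)
    rw [List.foldl_cons, pvStepA_eq c h1 h2 h3 h4 h5, ih htl]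
    simp only [List.count_cons, beq_iff_eq, Prod.mk.injEq]
    refine ⟨?_, ?_, ?_, ?_, ?_⟩ <;> split_ifs <;> simp_all <;> ring

-- the sorted vowel-filter equals "aeiou" exactly when each of the five vowels occurs once
theorem pvSortedFilterIff (cs : List Char) :
    PySem.List.sorted (cs.filter (fun c => "aeiou".toList.contains c)) (fun x => x) false
        = "aeiou".toList ↔
      cs.count 'a' = 1 ∧ cs.count 'e' = 1 ∧ cs.count 'i' = 1 ∧ cs.count 'o' = 1 ∧
        cs.count 'u' = 1 := by
  set p : Char → Bool := fun c => "aeiou".toList.contains c with hp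
  have hcnt : ∀ v : Char, p v = true → (cs.filter p).count v = cs.count v := by
    intro v hv
    simpa using List.count_filter (p := p) (l := cs) (a := v) hv
  constructor
  · intro hs
    have hperm : ("aeiou".toList).Perm (cs.filter p) := hs ▸ (PySem.List.sorted_perm ..)
    have hc : ∀ v : Char, (cs.filter p).count v = ("aeiou".toList).count v :=
      fun v => (hperm.count_eq v).symm
    refine ⟨?_, ?_, ?_, ?_, ?_⟩ <;>
      · rw [← hcnt _ (by decide), hc]; decide
  · rintro ⟨ha, he, hi, ho, hu⟩
    have hperm : ("aeiou".toList).Perm (cs.filter p) := by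
      rw [List.perm_iff_count]
      intro v
      by_cases hv : p v = true
      · have hm : v ∈ "aeiou".toList := List.contains_iff_mem.mp (by rw [hp] at hv; exact hv)
        rw [show "aeiou".toList = ['a', 'e', 'i', 'o', 'u'] from rfl] at hm
        simp only [List.mem_cons, List.not_mem_nil, or_false] at hm
        rw [hcnt v hv]
        rcases hm with rfl | rfl | rfl | rfl | rfl
        · rw [ha]; decide
        · rw [he]; decide
        · rw [hi]; decide
        · rw [ho]; decide
        · rw [hu]; decide
      · have h1 : (cs.filter p).count v = 0 := by
          rw [List.count_eq_zero]
          intro hmem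
          exact hv (List.of_mem_filter hmem)
        have h2 : ("aeiou".toList).count v = 0 := by
          rw [List.count_eq_zero]
          intro hmem
          exact hv (by simpa [hp] using hmem)
        rw [h1, h2]
    exact PySem.List.sorted_eq_of_perm_of_pairwise_lt _ _ _ hperm (by decide)

-- ===== VERDICT (by name: the statement is the Claim_ definition above) =====
theorem todas_vocales_sin_rep_spec : Claim_equal_todas_vocales_sin_rep := by
  intro pal hdom
  unfold Spec_todas_vocales_sin_rep todas_vocales_sin_rep todas_vocales_sin_rep_alt
  have hdom' : ∀ c ∈ pal.toList, pvDomChar c = true := by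
    simpa [Dom_todas_vocales_sin_rep, pvDomStr, List.all_eq_true] using hdom
  have hacc : ∀ c ∈ (PySem.Str.lower pal).toList,
      c ≠ 'á' ∧ c ≠ 'é' ∧ c ≠ 'í' ∧ c ≠ 'ó' ∧ c ≠ 'ú' := by
    intro c hc
    rw [PySem.Str.toList_lower] at hc
    simp only [PySem.Chars.lower, List.mem_map] at hc
    obtain ⟨d, hd, rfl⟩ := hc
    exact pvNoAccent _ (pvLower_toNat_le d (hdom' d hd))
  dsimp only
  rw [pvLoopEq _ hacc]
  rw [Bool.eq_iff_iff]
  simp only [Bool.and_eq_true, beq_iff_eq, pvSortedFilterIff]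
  constructor
  · rintro ⟨⟨⟨⟨ha, he⟩, hi⟩, ho⟩, hu⟩
    refine ⟨?_, ?_, ?_, ?_, ?_⟩ <;> omega
  · rintro ⟨ha, he, hi, ho, hu⟩
    refine ⟨⟨⟨⟨?_, ?_⟩, ?_⟩, ?_⟩, ?_⟩ <;> omega
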